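-- pv_equiv track=rewrite | github.com/GhaouiYoussef/Clario-Health-Rag-System | src/data_processing/cleaner.py | learn_noise_direction
-- ===== SOURCE A (Python) =====
-- from collections import Counter
--
-- WORDS = 5
--
-- def learn_noise_direction(pages_text, direction='start'):
--     noise_patterns = []
--     current_texts = list(pages_text)
--     total_docs = len(current_texts)
--
--     if total_docs == 0:
--         return []
--
--     max_iterations = 10
--
--     for _ in range(max_iterations):
--         found_layer = False
--         best_candidate = None
--
--         # Check varying lengths from WORDS down to 1
--         for length in range(WORDS, 0, -1):
--             candidates = []
--             for text in current_texts:
--                 words = text.split()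
--                 if not words: continue
--
--                 phrase = None
--                 if direction == 'start':
--                     if len(words) >= length:
--                         phrase = " ".join(words[:length])
--                 else: # end
--                     if len(words) >= length:
--                         phrase = " ".join(words[-length:])
--
--                 if phrase:
--                     candidates.append(phrase)
--
--             if not candidates:
--                 continue
--
--             counts = Counter(candidates)
--             cand, count = counts.most_common(1)[0]
--
--             # Threshold: > 15% of pages
--             if count / total_docs > 0.15:
--                 best_candidate = cand
--                 found_layer = True
--                 break
--
--         if found_layer and best_candidate:
--             noise_patterns.append(best_candidate)
--             # Strip this noise
--             for i, text in enumerate(current_texts):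
--                 if direction == 'start':
--                     if text.startswith(best_candidate):
--                          current_texts[i] = text[len(best_candidate):].strip()
--                 else:
--                     if text.endswith(best_candidate):
--                          current_texts[i] = text[:-len(best_candidate)].strip()
--         else:
--             break
--
--     return noise_patterns
-- ===== SOURCE B (Python) =====
-- WORDS = 5
--
-- def learn_noise_direction(pages_text, direction='start'):
--     total = len(pages_text)
--     if total == 0:
--         return []
--
--     def tally_counts(texts):
--         # one splitting pass: tally every prefix/suffix phrase of each text,
--         # keyed by (length, phrase), in text order
--         tally = {}
--         for t in texts:
--             w = t.split()
--             for k in range(1, min(len(w), WORDS) + 1):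
--                 p = " ".join(w[:k]) if direction == 'start' else " ".join(w[len(w) - k:])
--                 tally[(k, p)] = tally.get((k, p), 0) + 1
--         return tally
--
--     def pick(tally, k):
--         # longest length first; within a length, the first-inserted phrase wins ties
--         if k == 0:
--             return None
--         row = [(p, c) for (l, p), c in tally.items() if l == k]
--         if row:
--             best = max(row, key=lambda pc: pc[1])
--             if best[1] * 20 > 3 * total:
--                 return best[0]
--         return pick(tally, k - 1)
--
--     def remove(p, t):
--         if direction == 'start':
--             return t[len(p):].strip() if t.startswith(p) else t
--         return t[:-len(p)].strip() if t.endswith(p) else t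
--
--     def go(texts, budget):
--         if budget == 0:
--             return []
--         p = pick(tally_counts(texts), WORDS)
--         if p is None:
--             return []
--         return [p] + go([remove(p, t) for t in texts], budget - 1)
--
--     return go(list(pages_text), 10)
-- ===== Notes on version B (the rewrite author's own statement) =====
-- stated objective: alternative
-- what changed: A rescans and re-splits all texts once per length (5..1), building a fresh candidate list and Counter each time; B makes one tallying pass per iteration (each text split once, its phrase of every length 1..5 counted into a single dict keyed by (length, phrase)), then a recursive longest-length-first selection reads the winner off that table, and a recursive outer loop conses the found patterns instead of appending to an accumulator.
import Mathlib
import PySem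

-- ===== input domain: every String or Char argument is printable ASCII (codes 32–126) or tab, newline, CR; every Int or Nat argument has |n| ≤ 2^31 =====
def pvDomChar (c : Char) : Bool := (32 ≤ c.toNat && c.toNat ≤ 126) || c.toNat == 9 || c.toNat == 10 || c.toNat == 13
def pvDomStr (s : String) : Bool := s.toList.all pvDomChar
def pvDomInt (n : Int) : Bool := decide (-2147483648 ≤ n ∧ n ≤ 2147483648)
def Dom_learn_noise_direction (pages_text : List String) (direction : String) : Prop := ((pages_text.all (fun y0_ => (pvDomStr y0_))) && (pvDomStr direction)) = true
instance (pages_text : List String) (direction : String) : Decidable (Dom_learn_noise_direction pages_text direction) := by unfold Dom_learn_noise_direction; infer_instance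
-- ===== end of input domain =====

-- B replaces A's per-length rescans by one tallying pass per iteration into a single dict keyed by
-- (length, phrase), a recursive longest-length-first selection over that dict, and a recursive outer
-- loop that conses each found pattern (objective: alternative decomposition; return value only —
-- A mutates only a local copy of its input).

-- ===== PORT A =====
-- A's inner candidate-collection loop for one phrase length L ('for text in current_texts: …')
def pvCandStepA (direction : String) (L : Int) (acc : List String) (t : String) : List String :=
  let words := PySem.Str.split₀ t
  if words = [] then acc          -- 'if not words: continue'
  else
    let phrase : Option String :=  -- 'phrase = None' then the two branches
      if direction == "start" then
        (if L ≤ (words.length : Int) then some (PySem.Str.join " " (PySem.List.slice words none (some L))) else none)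
      else
        (if L ≤ (words.length : Int) then some (PySem.Str.join " " (PySem.List.slice words (some (-L)) none)) else none)
    match phrase with              -- 'if phrase: candidates.append(phrase)' (phrase is a nonempty string when set)
    | some p => acc ++ [p]
    | none => acc

-- body of A's 'for length in range(WORDS, 0, -1)' loop for one length L
def pvTryLenA (direction : String) (total : Int) (texts : List String) (L : Int) : Option String :=
  let candidates := texts.foldl (pvCandStepA direction L) []
  if candidates = [] then none   -- 'if not candidates: continue'
  else
    let counts := PySem.Dict.counter candidates   -- Counter(candidates)
    -- most_common(1)[0]: the first key of maximal count in insertion order (heapq.nlargest is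
    -- stable), i.e. the first extremal item = PySem.List.max? over the Counter's items
    match PySem.List.max? counts.items (fun kc => kc.2) with
    | some (cand, count) =>
        -- 'count / total_docs > 0.15' written in exact rational form (exact at these magnitudes)
        if 20 * count > 3 * total then some cand else none
    | none => none

-- 'for i, text in enumerate(current_texts): …' strip step (in-place on a local copy = map)
def pvStripA (direction : String) (best : String) (texts : List String) : List String :=
  texts.map (fun t =>
    if direction == "start" then
      if PySem.Str.startswith t best then PySem.Str.strip (PySem.Str.slice t (some (PySem.Str.len best)) none) else t
    else
      if PySem.Str.endswith t best then PySem.Str.strip (PySem.Str.slice t none (some (-(PySem.Str.len best)))) else t)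

-- 'for _ in range(max_iterations)' with the two breaks
def pvLoopA (direction : String) (total : Int) : Nat → List String → List String → List String
  | 0, _, noise => noise
  | fuel + 1, texts, noise =>
    match (PySem.List.pyRange 5 0 (-1)).foldl (fun best L =>
        match best with
        | some _ => best                             -- already found: 'break'
        | none => pvTryLenA direction total texts L) none with
    | some best => pvLoopA direction total fuel (pvStripA direction best texts) (noise ++ [best])
    | none => noise                                  -- 'else: break'

def learn_noise_direction (pages_text : List String) (direction : String) : List String :=
  let current_texts := pages_text
  let total : Int := (current_texts.length : Int)
  if total = 0 then [] else pvLoopA direction total 10 current_texts []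

-- ===== PORT B =====
-- tally_counts, body for one text t: split once, tally its phrase of every length 1..min(len(w), WORDS)
def pvTallyText (direction : String) (t : String) (d : PySem.Dict (Int × String) Int) : PySem.Dict (Int × String) Int :=
  let w := PySem.Str.split₀ t
  (PySem.List.pyRange 1 (min ((w.length : Int)) 5 + 1) 1).foldl (fun d k =>
    let p := if direction == "start" then PySem.Str.join " " (PySem.List.slice w none (some k))
             else PySem.Str.join " " (PySem.List.slice w (some ((w.length : Int) - k)) none)
    d.modify (k, p) 0 (· + 1)) d

-- the row of one length: its (phrase, count) pairs, in first-insertion order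
def pvRowB (tally : PySem.Dict (Int × String) Int) (k : Int) : List (String × Int) :=
  tally.items.filterMap (fun q => if q.1.1 == k then some (q.1.2, q.2) else none)

-- pick: recursive, longest length first; Python's max returns the FIRST maximal element
def pvPickB (total : Int) (tally : PySem.Dict (Int × String) Int) : Nat → Option String
  | 0 => none
  | k + 1 =>
    match PySem.List.max? (pvRowB tally ((k : Int) + 1)) (fun pc => pc.2) with
    | some best => if best.2 * 20 > 3 * total then some best.1 else pvPickB total tally k
    | none => pvPickB total tally k

def pvRemoveB (direction p t : String) : String :=
  if direction == "start" then
    if PySem.Str.startswith t p then PySem.Str.strip (PySem.Str.slice t (some (PySem.Str.len p)) none) else t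
  else
    if PySem.Str.endswith t p then PySem.Str.strip (PySem.Str.slice t none (some (-(PySem.Str.len p)))) else t

-- go: recursion on the remaining budget, consing each found pattern
def pvGoB (direction : String) (total : Int) : Nat → List String → List String
  | 0, _ => []
  | b + 1, texts =>
    match pvPickB total (texts.foldl (fun d t => pvTallyText direction t d) PySem.Dict.empty) 5 with
    | some p => p :: pvGoB direction total b (texts.map (pvRemoveB direction p))
    | none => []

def learn_noise_direction_alt (pages_text : List String) (direction : String) : List String :=
  if pages_text.length = 0 then []
  else pvGoB direction (pages_text.length : Int) 10 pages_text

-- ===== PRECONDITION & SPEC =====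
def Spec_learn_noise_direction (pages_text : List String) (direction : String) (out : List String) : Prop := out = learn_noise_direction_alt pages_text direction
instance (pages_text : List String) (direction : String) (out : List String) : Decidable (Spec_learn_noise_direction pages_text direction out) := by unfold Spec_learn_noise_direction; infer_instance

-- ===== CLAIM (what is proved, stated in full; the proofs are below) =====
def Claim_equal_learn_noise_direction : Prop := ∀ (pages_text : List String) (direction : String), Dom_learn_noise_direction pages_text direction → Spec_learn_noise_direction pages_text direction (learn_noise_direction pages_text direction)

-- ===== LEMMAS AND PROOFS =====

-- the phrase of length L taken from text t (what both programs join)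
def pvPh (direction : String) (t : String) (L : Int) : String :=
  if direction == "start" then PySem.Str.join " " (PySem.List.slice (PySem.Str.split₀ t) none (some L))
  else PySem.Str.join " " (PySem.List.slice (PySem.Str.split₀ t) (some (-L)) none)

-- A's candidate list for length L
def pvCands (direction : String) (L : Int) (texts : List String) : List String :=
  (texts.filter (fun t => decide (L ≤ ((PySem.Str.split₀ t).length : Int)))).map (fun t => pvPh direction t L)

-- the flat list of (length, phrase) pairs B's tallying pass counts
def pvPairs (direction : String) (texts : List String) : List (Int × String) :=
  texts.flatMap (fun t =>
    (((PySem.List.pyRange 1 6 1).filter (fun L => decide (L ≤ ((PySem.Str.split₀ t).length : Int)))).map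
      (fun L => ((L, pvPh direction t L) : Int × String))))

lemma candsA_eq (direction : String) (L : Int) (hL : 1 ≤ L) (texts : List String) :
    texts.foldl (pvCandStepA direction L) [] = pvCands direction L texts := by
  unfold pvCands
  rw [PySem.List.foldl_congr_mem texts (pvCandStepA direction L)
      (fun acc t => if L ≤ ((PySem.Str.split₀ t).length : Int) then acc ++ [pvPh direction t L] else acc) []
      (by
        intro acc t _
        unfold pvCandStepA pvPh
        by_cases hw : PySem.Str.split₀ t = []
        · have hc : ¬ (L ≤ ((PySem.Str.split₀ t).length : Int)) := by
            rw [hw]; simp; omega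
          simp [hw]
          omega
        · simp only [hw]
          by_cases hd : direction == "start" <;> by_cases hc : L ≤ ((PySem.Str.split₀ t).length : Int) <;>
            simp [hd, hc])]
  rw [PySem.List.foldl_append_ite (fun t => L ≤ ((PySem.Str.split₀ t).length : Int)) (fun t => pvPh direction t L)]
  simp

-- B's per-text range 1..min(len, 5) is A's guarded range 1..5
lemma range_min_eq_filter (L : Nat) :
    PySem.List.pyRange 1 (min ((L : Int)) 5 + 1) 1
      = (PySem.List.pyRange 1 6 1).filter (fun k => decide (k ≤ (L : Int))) := by
  by_cases h5 : 5 ≤ L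
  · have hmin : min ((L : Int)) 5 = 5 := by omega
    rw [hmin]
    have : ∀ k ∈ PySem.List.pyRange 1 6 1, decide (k ≤ (L : Int)) = true := by
      intro k hk
      have := PySem.List.mem_pyRange_one.mp hk
      simp only [decide_eq_true_eq]
      omega
    rw [List.filter_eq_self.mpr this]
    norm_num
  · interval_cases L <;> decide

-- B's per-text tallying = folding the (length, phrase) pairs of that text
lemma tallyText_eq (direction : String) (t : String) (d : PySem.Dict (Int × String) Int) :
    pvTallyText direction t d
      = ((((PySem.List.pyRange 1 6 1).filter (fun L => decide (L ≤ ((PySem.Str.split₀ t).length : Int)))).map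
          (fun L => ((L, pvPh direction t L) : Int × String))).foldl (fun d p => d.modify p 0 (· + 1)) d) := by
  simp only [pvTallyText]
  rw [range_min_eq_filter (PySem.Str.split₀ t).length, List.foldl_map]
  apply PySem.List.foldl_congr_mem
  intro d' k hk
  have hmem := List.mem_filter.mp hk
  have hrange := PySem.List.mem_pyRange_one.mp hmem.1
  have hle : k ≤ ((PySem.Str.split₀ t).length : Int) := by
    have := hmem.2; simpa using this
  have hph : (if (direction == "start") = true then PySem.Str.join " " (PySem.List.slice (PySem.Str.split₀ t) none (some k))
      else PySem.Str.join " " (PySem.List.slice (PySem.Str.split₀ t) (some (((PySem.Str.split₀ t).length : Int) - k)) none))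
      = pvPh direction t k := by
    unfold pvPh
    by_cases hd : direction == "start"
    · simp [hd]
    · simp only [hd, Bool.false_eq_true, if_false]
      congr 1
      obtain ⟨n, rfl, hn0, hnle⟩ : ∃ n : Nat, k = (n : Int) ∧ 0 < n ∧ n ≤ (PySem.Str.split₀ t).length :=
        ⟨k.toNat, by omega, by omega, by omega⟩
      rw [PySem.List.slice_from_neg_natCast (xs := PySem.Str.split₀ t) (k := n) hn0,
          show ((PySem.Str.split₀ t).length : Int) - (n : Int) = (((PySem.Str.split₀ t).length - n : Nat) : Int) from by omega,
          PySem.List.slice_from_natCast]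
  rw [hph]

lemma tableB_eq (direction : String) (texts : List String) :
    texts.foldl (fun d t => pvTallyText direction t d) PySem.Dict.empty
      = PySem.Dict.counter (pvPairs direction texts) := by
  rw [PySem.Dict.counter_eq_foldl]
  suffices h : ∀ d, texts.foldl (fun d t => pvTallyText direction t d) d
      = (pvPairs direction texts).foldl (fun d p => d.modify p 0 (· + 1)) d from h _
  induction texts with
  | nil => intro d; rfl
  | cons t ts ih =>
    intro d
    simp only [List.foldl_cons, pvPairs, List.flatMap_cons, List.foldl_append]
    rw [tallyText_eq, ih]
    rfl

-- set(...) of a filtered list = filtering the set (first-occurrence orders agree)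
lemma ofList_filter {α : Type} [BEq α] [LawfulBEq α] (q : α → Bool) (xs : List α) :
    (PySem.Set.ofList xs).filter q = PySem.Set.ofList (xs.filter q) := by
  induction xs using List.reverseRecOn with
  | nil => rfl
  | append_singleton xs x ih =>
    by_cases hq : q x
    · have hfilt : List.filter q (xs ++ [x]) = List.filter q xs ++ [x] := by
        simp [List.filter_append, hq]
      rw [hfilt, PySem.Set.ofList_append_singleton, PySem.Set.ofList_append_singleton,
          PySem.Set.add_eq_ite, PySem.Set.add_eq_ite]
      by_cases hm : x ∈ PySem.Set.ofList xs
      · rw [if_pos hm, ih, if_pos (by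
          rw [PySem.Set.mem_ofList]
          exact List.mem_filter.mpr ⟨(PySem.Set.mem_ofList xs x).mp hm, hq⟩)]
      · rw [if_neg hm, if_neg (by
          rw [PySem.Set.mem_ofList]
          intro hmem
          exact hm ((PySem.Set.mem_ofList xs x).mpr (List.mem_filter.mp hmem).1)),
          List.filter_append, ih]
        simp [hq]
    · have hfilt : List.filter q (xs ++ [x]) = List.filter q xs := by
        simp [List.filter_append, hq]
      rw [hfilt, PySem.Set.ofList_append_singleton, PySem.Set.add_eq_ite]
      by_cases hm : x ∈ PySem.Set.ofList xs
      · rw [if_pos hm, ih]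
      · rw [if_neg hm, List.filter_append, ih]
        simp [hq]

-- set(map f xs) = map f (set xs) for injective f
lemma ofList_map_inj {α β : Type} [BEq α] [LawfulBEq α] [BEq β] [LawfulBEq β]
    (f : α → β) (hf : Function.Injective f) (xs : List α) :
    PySem.Set.ofList (xs.map f) = (PySem.Set.ofList xs).map f := by
  induction xs using List.reverseRecOn with
  | nil => rfl
  | append_singleton xs x ih =>
    rw [List.map_append, List.map_singleton, PySem.Set.ofList_append_singleton,
      PySem.Set.ofList_append_singleton, PySem.Set.add_eq_ite, PySem.Set.add_eq_ite, ih]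
    by_cases hm : x ∈ PySem.Set.ofList xs
    · rw [if_pos hm, if_pos (List.mem_map_of_mem hm)]
    · rw [if_neg hm, if_neg (by
        intro hmem
        obtain ⟨y, hy, hxy⟩ := List.mem_map.mp hmem
        exact hm (hf hxy ▸ hy)), List.map_append, List.map_singleton]

lemma filter_beq_and (lst : List Int) (hnd : lst.Nodup) (c : Int → Bool) (L : Int) (hL : L ∈ lst) :
    lst.filter (fun x => (x == L) && c x) = if c L then [L] else [] := by
  induction lst with
  | nil => cases hL
  | cons a tl ih =>
    rw [List.nodup_cons] at hnd
    by_cases ha : a = L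
    · subst ha
      have htl : tl.filter (fun x => (x == a) && c x) = [] := by
        rw [List.filter_eq_nil_iff]
        intro x hx
        simp only [Bool.and_eq_true, beq_iff_eq]
        rintro ⟨rfl, -⟩
        exact hnd.1 hx
      by_cases hc : c a <;> simp [hc, htl]
    · have hL' : L ∈ tl := by
        cases hL with
        | head => exact absurd rfl ha
        | tail _ h => exact h
      have hhead : ((a == L) && c a) = false := by simp [ha]
      simp only [List.filter_cons, hhead, Bool.false_eq_true]
      rw [ih hnd.2 hL']
      simp

lemma per_text_filter (direction : String) (t : String) (L : Int) (hL : 1 ≤ L) (hL5 : L ≤ 5) :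
    ((((PySem.List.pyRange 1 6 1).filter (fun L' => decide (L' ≤ ((PySem.Str.split₀ t).length : Int)))).map
      (fun L' => ((L', pvPh direction t L') : Int × String))).filter (fun p => p.1 == L))
    = if decide (L ≤ ((PySem.Str.split₀ t).length : Int)) then [((L, pvPh direction t L) : Int × String)] else [] := by
  rw [List.filter_map, List.filter_filter]
  have hcomp : ((fun (p : Int × String) => p.1 == L) ∘ (fun L' => ((L', pvPh direction t L') : Int × String)))
      = fun L' => L' == L := rfl
  rw [hcomp]
  rw [filter_beq_and _ (PySem.List.nodup_pyRange_one 1 6) _ L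
      (PySem.List.mem_pyRange_one.mpr ⟨hL, by omega⟩)]
  by_cases hc : decide (L ≤ ((PySem.Str.split₀ t).length : Int)) <;> simp [hc]

lemma pairs_filter_eq (direction : String) (L : Int) (hL : 1 ≤ L) (hL5 : L ≤ 5) (texts : List String) :
    (pvPairs direction texts).filter (fun p => p.1 == L)
      = (pvCands direction L texts).map (fun s => ((L, s) : Int × String)) := by
  induction texts with
  | nil => rfl
  | cons t ts ih =>
    simp only [pvPairs, List.flatMap_cons, List.filter_append] at *
    rw [ih, per_text_filter direction t L hL hL5]
    simp only [pvCands, List.filter_cons]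
    by_cases hc : decide (L ≤ ((PySem.Str.split₀ t).length : Int)) <;> simp [hc]

lemma pairs_count_eq (direction : String) (L : Int) (hL : 1 ≤ L) (hL5 : L ≤ 5) (texts : List String) (s : String) :
    (pvPairs direction texts).count (L, s) = (pvCands direction L texts).count s := by
  have h1 : (pvPairs direction texts).count (L, s)
      = ((pvPairs direction texts).filter (fun p => p.1 == L)).count (L, s) := by
    rw [List.count_filter (by simp)]
  rw [h1, pairs_filter_eq direction L hL hL5,
    List.count_map_of_injective _ _ (fun a b h => by simpa using h)]

-- filterMap of a guarded some = map after filter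
lemma filterMap_guard {α β : Type} (p : α → Bool) (g : α → β) (l : List α) :
    l.filterMap (fun x => if p x then some (g x) else none) = (l.filter p).map g := by
  induction l with
  | nil => rfl
  | cons a tl ih =>
    by_cases hp : p a <;> simp [hp, ih]

-- the row B reads off the tally IS the items of A's Counter of that length's candidates
lemma rowB_eq (direction : String) (texts : List String) (L : Int) (hL : 1 ≤ L) (hL5 : L ≤ 5) :
    pvRowB (texts.foldl (fun d t => pvTallyText direction t d) PySem.Dict.empty) L
      = (PySem.Dict.counter (pvCands direction L texts)).items := by
  have hinj : Function.Injective (fun s : String => ((L, s) : Int × String)) := fun a b h => by simpa using h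
  unfold pvRowB
  rw [tableB_eq, filterMap_guard (fun q : (Int × String) × Int => q.1.1 == L) (fun q => (q.1.2, q.2)),
      PySem.Dict.items_counter, List.filter_map]
  have hcomp : ((fun (p : (Int × String) × Int) => p.1.1 == L) ∘
      (fun k : Int × String => (k, ((pvPairs direction texts).count k : Int)))) = fun k : Int × String => k.1 == L := rfl
  rw [hcomp, ofList_filter, pairs_filter_eq direction L hL hL5, ofList_map_inj _ hinj,
      PySem.Dict.items_counter, List.map_map, List.map_map]
  apply List.map_congr_left
  intro s hs
  simp only [Function.comp_apply]
  rw [pairs_count_eq direction L hL hL5]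

-- A's foldl over range(5,0,-1) keeps the first hit
lemma foldl_keep_some (f : Int → Option String) (l : List Int) (s : String) :
    l.foldl (fun best L => match best with | some _ => best | none => f L) (some s) = some s := by
  induction l with
  | nil => rfl
  | cons a tl ih => simpa using ih

-- B's recursive pick = A's length loop
lemma pick_eq (direction : String) (total : Int) (texts : List String) :
    ∀ k : Nat, k ≤ 5 →
      pvPickB total (texts.foldl (fun d t => pvTallyText direction t d) PySem.Dict.empty) k
        = (PySem.List.pyRange (k : Int) 0 (-1)).foldl (fun best L =>
            match best with
            | some _ => best
            | none => pvTryLenA direction total texts L) none := by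
  intro k
  induction k with
  | zero => intro _; rfl
  | succ k ih =>
    intro hk5
    have hcons : PySem.List.pyRange ((k + 1 : Nat) : Int) 0 (-1)
        = ((k : Int) + 1) :: PySem.List.pyRange ((k : Int)) 0 (-1) := by
      have := PySem.List.pyRange_neg_one_cons (a := ((k + 1 : Nat) : Int)) (b := 0) (by omega)
      push_cast at this ⊢
      simpa using this
    rw [hcons]
    have hL1 : (1 : Int) ≤ (k : Int) + 1 := by omega
    have htry : pvTryLenA direction total texts ((k : Int) + 1)
        = match PySem.List.max? (pvRowB (texts.foldl (fun d t => pvTallyText direction t d) PySem.Dict.empty) ((k : Int) + 1)) (fun pc => pc.2) with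
          | some best => if best.2 * 20 > 3 * total then some best.1 else none
          | none => none := by
      rw [rowB_eq direction texts ((k : Int) + 1) hL1 (by omega)]
      simp only [pvTryLenA]
      rw [candsA_eq direction ((k : Int) + 1) hL1 texts]
      by_cases hc : pvCands direction ((k : Int) + 1) texts = []
      · rw [hc]; rfl
      · rw [if_neg hc]
        cases hm : PySem.List.max? ((PySem.Dict.counter (pvCands direction ((k : Int) + 1) texts)).items) (fun pc => pc.2) with
        | none => rfl
        | some best =>
          obtain ⟨c1, c2⟩ := best
          change (if 20 * c2 > 3 * total then some c1 else none)
              = if c2 * 20 > 3 * total then some c1 else none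
          rw [show c2 * 20 = 20 * c2 from Int.mul_comm c2 20]
    have hred : (((k : Int) + 1) :: PySem.List.pyRange ((k : Int)) 0 (-1)).foldl (fun best L =>
            match best with
            | some _ => best
            | none => pvTryLenA direction total texts L) none
        = (PySem.List.pyRange ((k : Int)) 0 (-1)).foldl (fun best L =>
            match best with
            | some _ => best
            | none => pvTryLenA direction total texts L) (pvTryLenA direction total texts ((k : Int) + 1)) := rfl
    rw [hred]
    simp only [pvPickB]
    cases hmax : PySem.List.max? (pvRowB (texts.foldl (fun d t => pvTallyText direction t d) PySem.Dict.empty) ((k : Int) + 1)) (fun pc => pc.2) with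
    | none =>
      have htry' : pvTryLenA direction total texts ((k : Int) + 1) = none := by rw [htry, hmax]
      change pvPickB total (texts.foldl (fun d t => pvTallyText direction t d) PySem.Dict.empty) k = _
      rw [htry', ih (by omega)]
    | some best =>
      have htry' : pvTryLenA direction total texts ((k : Int) + 1)
          = if best.2 * 20 > 3 * total then some best.1 else none := by rw [htry, hmax]
      change (if best.2 * 20 > 3 * total then some best.1
          else pvPickB total (texts.foldl (fun d t => pvTallyText direction t d) PySem.Dict.empty) k) = _
      by_cases hthr : best.2 * 20 > 3 * total
      · rw [if_pos hthr] at htry' ⊢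
        rw [htry', foldl_keep_some]
      · rw [if_neg hthr] at htry' ⊢
        rw [htry', ih (by omega)]

-- the outer loops agree (A appends, B conses)
lemma loop_eq (direction : String) (total : Int) (fuel : Nat) (texts noise : List String) :
    pvLoopA direction total fuel texts noise = noise ++ pvGoB direction total fuel texts := by
  induction fuel generalizing texts noise with
  | zero => simp [pvLoopA, pvGoB]
  | succ fuel ih =>
    simp only [pvLoopA, pvGoB]
    have h5 : ((5 : Nat) : Int) = (5 : Int) := by norm_num
    rw [← h5, ← pick_eq direction total texts 5 (by omega)]
    cases hpick : pvPickB total (texts.foldl (fun d t => pvTallyText direction t d) PySem.Dict.empty) 5 with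
    | none => simp
    | some best =>
      simp only []
      have hstrip : pvStripA direction best texts = texts.map (pvRemoveB direction best) := rfl
      rw [hstrip, ih]
      simp

-- ===== VERDICT (by name: the statement is the Claim_ definition above) =====
theorem learn_noise_direction_spec : Claim_equal_learn_noise_direction := by
  intro pages_text direction _
  unfold Spec_learn_noise_direction learn_noise_direction learn_noise_direction_alt
  simp only []
  by_cases h : pages_text.length = 0
  · simp [h]
  · rw [if_neg (by exact_mod_cast h), if_neg h]
    simpa using loop_eq direction (pages_text.length : Int) 10 pages_text []
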